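-- pv_equiv track=rewrite | github.com/psychemistz/cytoatlas | scripts/07_scatlas_immune_analysis.py | is_stromal_cell
-- ===== SOURCE A (Python) =====
-- STROMAL_PATTERNS = [
--     # subCluster prefixes (must check before generic patterns)
--     'E01_', 'E02_', 'E03_', 'E04_', 'E05_', 'E06_',  # Endothelial cells
--     'S01_', 'S02_', 'S03_', 'S04_', 'S05_', 'S06_', 'S07_', 'S08_', 'S09_', 'S10_',
--     'S11_', 'S12_', 'S13_', 'S14_', 'S15_', 'S16_', 'S17_', 'S18_', 'S19_', 'S20_',
--     'S21_', 'S22_', 'S23_', 'S24_',  # Stromal cells (Fb, Pericyte, SMC, CAF, etc.)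
--     # Original patterns
--     'Fb_', 'Fibroblast', 'CAF', 'Stromal', 'myoFb',
--     'Endo', 'Endothelial', 'Pericyte', 'Smooth',
--     'Adipocyte', 'Mesenchymal',
--     'EC_',  # Endothelial cell clusters (e.g., EC_05_KDR)
--     'Mu_',  # Muscle/smooth muscle cells (e.g., Mu_01_MYH11)
--     'Stellate',  # Hepatic stellate cells
--     'Myocyte',  # Muscle cells
--     'iCAF', 'myCAF', 'apCAF',  # CAF subtypes
-- ]
--
-- def is_stromal_cell(cell_type_str):
--     """Check if cell type is stromal (fibroblast, endothelial, etc.).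
--
--     Handles subCluster prefixes: E*=Endothelial, S*=Stromal
--     """
--     cell_type_str = str(cell_type_str).lower()
--
--     # Check subCluster prefixes first (must match at start)
--     stromal_prefixes = ['e01_', 'e02_', 'e03_', 'e04_', 'e05_', 'e06_',
--                         's01_', 's02_', 's03_', 's04_', 's05_', 's06_', 's07_', 's08_', 's09_', 's10_',
--                         's11_', 's12_', 's13_', 's14_', 's15_', 's16_', 's17_', 's18_', 's19_', 's20_',
--                         's21_', 's22_', 's23_', 's24_']
--     for prefix in stromal_prefixes:
--         if cell_type_str.startswith(prefix):
--             return True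
--
--     # Fall back to generic pattern matching
--     for pattern in STROMAL_PATTERNS:
--         # Skip prefix patterns (already checked above)
--         if pattern.endswith('_') and len(pattern) <= 4:
--             continue
--         if pattern.lower() in cell_type_str:
--             return True
--     return False
-- ===== SOURCE B (Python) =====
-- # B: decode the E01_-/S01_-style prefix arithmetically (one digit-pair check instead of
-- # scanning 30 prefix literals) and test the 11 non-redundant lowercase substrings
-- # (endothelial/iCAF/myCAF/apCAF are subsumed by endo/caf).
-- _STROMAL_SUBSTRINGS = ('fibroblast', 'caf', 'stromal', 'myofb', 'endo',
--                        'pericyte', 'smooth', 'adipocyte', 'mesenchymal',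
--                        'stellate', 'myocyte')
--
-- def is_stromal_cell(cell_type_str):
--     s = str(cell_type_str).lower()
--     if len(s) >= 4 and s[3] == '_' and s[1].isdigit() and s[2].isdigit():
--         n = (ord(s[1]) - 48) * 10 + (ord(s[2]) - 48)
--         if (s[0] == 'e' and 1 <= n <= 6) or (s[0] == 's' and 1 <= n <= 24):
--             return True
--     return any(p in s for p in _STROMAL_SUBSTRINGS)
-- ===== Notes on version B (the rewrite author's own statement) =====
-- stated objective: simpler
-- what changed: Replaced the 30-literal prefix scan by one arithmetic decode of the prefix shape (letter e or s, two digits whose value is in range, then underscore), and dropped the four substring patterns subsumed by others (endothelial by endo; iCAF/myCAF/apCAF by caf), leaving a single any() over 11 substrings.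
import Mathlib
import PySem

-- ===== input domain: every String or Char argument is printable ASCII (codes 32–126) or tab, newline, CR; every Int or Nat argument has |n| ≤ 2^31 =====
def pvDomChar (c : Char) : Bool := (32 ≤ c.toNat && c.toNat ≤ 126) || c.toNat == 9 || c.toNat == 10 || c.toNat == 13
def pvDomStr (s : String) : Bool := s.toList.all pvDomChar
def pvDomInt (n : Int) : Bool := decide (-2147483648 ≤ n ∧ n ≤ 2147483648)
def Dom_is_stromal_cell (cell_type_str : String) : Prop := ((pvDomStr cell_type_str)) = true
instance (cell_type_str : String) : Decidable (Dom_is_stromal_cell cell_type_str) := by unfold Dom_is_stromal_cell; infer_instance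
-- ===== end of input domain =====

-- B replaces A's 30-literal prefix scan by one arithmetic decode of the prefix shape
-- (letter e or s, two digits whose value is in range, then underscore) and drops the four
-- substring patterns subsumed by others (endothelial by endo; iCAF/myCAF/apCAF by caf);
-- objective: simpler.


-- ===== PORT A =====
def pvStromalPatterns : List String :=
  ["E01_", "E02_", "E03_", "E04_", "E05_", "E06_",
   "S01_", "S02_", "S03_", "S04_", "S05_", "S06_", "S07_", "S08_", "S09_", "S10_",
   "S11_", "S12_", "S13_", "S14_", "S15_", "S16_", "S17_", "S18_", "S19_", "S20_",
   "S21_", "S22_", "S23_", "S24_",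
   "Fb_", "Fibroblast", "CAF", "Stromal", "myoFb",
   "Endo", "Endothelial", "Pericyte", "Smooth",
   "Adipocyte", "Mesenchymal",
   "EC_", "Mu_", "Stellate", "Myocyte",
   "iCAF", "myCAF", "apCAF"]

def pvStromalPrefixes : List String :=
  ["e01_", "e02_", "e03_", "e04_", "e05_", "e06_",
   "s01_", "s02_", "s03_", "s04_", "s05_", "s06_", "s07_", "s08_", "s09_", "s10_",
   "s11_", "s12_", "s13_", "s14_", "s15_", "s16_", "s17_", "s18_", "s19_", "s20_",
   "s21_", "s22_", "s23_", "s24_"]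

def is_stromal_cell (cell_type_str : String) : Bool :=
  let s := PySem.Str.lower cell_type_str
  if pvStromalPrefixes.any (fun p => PySem.Str.startswith s p) then
    true
  else
    pvStromalPatterns.any (fun p =>
      if PySem.Str.endswith p "_" && decide (PySem.Str.len p ≤ 4) then false
      else PySem.Str.isIn (PySem.Str.lower p) s)

-- ===== PORT B =====
def pvStromalSubstrings : List String :=
  ["fibroblast", "caf", "stromal", "myofb", "endo",
   "pericyte", "smooth", "adipocyte", "mesenchymal",
   "stellate", "myocyte"]

def is_stromal_cell_alt (cell_type_str : String) : Bool :=
  let t := PySem.Chars.lower cell_type_str.toList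
  -- the match encodes Source B's 'len(s) >= 4' guard together with the in-range accesses s[0..3]
  let prefixHit : Bool :=
    match t with
    | c0 :: c1 :: c2 :: c3 :: _ =>
      if c3 == '_' && PySem.Chars.isdigit c1 && PySem.Chars.isdigit c2 then
        let n : Int := ((c1.toNat : Int) - 48) * 10 + ((c2.toNat : Int) - 48)
        (c0 == 'e' && decide (1 ≤ n) && decide (n ≤ 6)) ||
        (c0 == 's' && decide (1 ≤ n) && decide (n ≤ 24))
      else false
    | _ => false
  prefixHit || pvStromalSubstrings.any (fun p => PySem.Chars.isIn p.toList t)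

-- ===== PRECONDITION & SPEC =====
def Spec_is_stromal_cell (cell_type_str : String) (out : Bool) : Prop := out = is_stromal_cell_alt cell_type_str
instance (cell_type_str : String) (out : Bool) : Decidable (Spec_is_stromal_cell cell_type_str out) := by unfold Spec_is_stromal_cell; infer_instance

-- ===== CLAIM (what is proved, stated in full; the proofs are below) =====
def Claim_equal_is_stromal_cell : Prop := ∀ (cell_type_str : String), Dom_is_stromal_cell cell_type_str → Spec_is_stromal_cell cell_type_str (is_stromal_cell cell_type_str)

-- ===== LEMMAS AND PROOFS =====

theorem pv_char_eq (c d : Char) : (c = d) ↔ c.toNat = d.toNat :=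
  ⟨fun h => h ▸ rfl, fun h => Char.ext (UInt32.toNat_inj.mp h)⟩

theorem pv_val_toNat (c : Char) : c.val.toNat = c.toNat := rfl

set_option maxHeartbeats 1000000 in
theorem pv_P (t : List Char) :
    pvStromalPrefixes.any (fun p => PySem.Chars.startswith t p.toList) =
    (match t with
      | c0 :: c1 :: c2 :: c3 :: _ =>
        if c3 == '_' && PySem.Chars.isdigit c1 && PySem.Chars.isdigit c2 then
          let n : Int := ((c1.toNat : Int) - 48) * 10 + ((c2.toNat : Int) - 48)
          (c0 == 'e' && decide (1 ≤ n) && decide (n ≤ 6)) ||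
          (c0 == 's' && decide (1 ≤ n) && decide (n ≤ 24))
        else false
      | _ => false) := by
  rcases t with _|⟨c0,_|⟨c1,_|⟨c2,_|⟨c3,r⟩⟩⟩⟩ <;>
    simp only [pvStromalPrefixes, List.any_cons, List.any_nil, PySem.Chars.startswith] <;>
    simp [List.isPrefixOf, PySem.Chars.isdigit]
  rw [Bool.eq_iff_iff]
  simp only [pv_char_eq, beq_iff_eq, Bool.or_eq_true, Bool.and_eq_true, decide_eq_true_eq,
    Char.le_def, UInt32.le_iff_toNat_le, pv_val_toNat,
    (show ('e').toNat = 101 from rfl), (show ('s').toNat = 115 from rfl),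
    (show ('_').toNat = 95 from rfl),
    (show ('0').toNat = 48 from rfl), (show ('1').toNat = 49 from rfl),
    (show ('2').toNat = 50 from rfl), (show ('3').toNat = 51 from rfl),
    (show ('4').toNat = 52 from rfl), (show ('5').toNat = 53 from rfl),
    (show ('6').toNat = 54 from rfl), (show ('7').toNat = 55 from rfl),
    (show ('8').toNat = 56 from rfl), (show ('9').toNat = 57 from rfl)]
  constructor
  · rintro (h|h|h|h|h|h|h|h|h|h|h|h|h|h|h|h|h|h|h|h|h|h|h|h|h|h|h|h|h|h) <;> omega
  · rintro ⟨⟨⟨h3, h1l, h1u⟩, h2l, h2u⟩, hbr⟩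
    set d1 := c1.toNat with hd1
    set d2 := c2.toNat with hd2
    rcases hbr with ⟨⟨h0, hge⟩, hle⟩ | ⟨⟨h0, hge⟩, hle⟩
    · have e1 : d1 = 48 := by omega
      have e2l : 49 ≤ d2 := by omega
      have e2u : d2 ≤ 54 := by omega
      interval_cases d2
      · exact Or.inl ⟨h0.symm, e1.symm, rfl, h3.symm⟩
      · exact Or.inr (Or.inl ⟨h0.symm, e1.symm, rfl, h3.symm⟩)
      · exact Or.inr (Or.inr (Or.inl ⟨h0.symm, e1.symm, rfl, h3.symm⟩))
      · exact Or.inr (Or.inr (Or.inr (Or.inl ⟨h0.symm, e1.symm, rfl, h3.symm⟩)))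
      · exact Or.inr (Or.inr (Or.inr (Or.inr (Or.inl ⟨h0.symm, e1.symm, rfl, h3.symm⟩))))
      · exact Or.inr (Or.inr (Or.inr (Or.inr (Or.inr (Or.inl ⟨h0.symm, e1.symm, rfl, h3.symm⟩)))))
    · have s1l : 48 ≤ d1 := h1l
      have s1u : d1 ≤ 50 := by omega
      interval_cases d1
      · interval_cases d2
        · exact absurd hge (by omega)
        · exact Or.inr (Or.inr (Or.inr (Or.inr (Or.inr (Or.inr (Or.inl ⟨h0.symm, rfl, rfl, h3.symm⟩))))))
        · exact Or.inr (Or.inr (Or.inr (Or.inr (Or.inr (Or.inr (Or.inr (Or.inl ⟨h0.symm, rfl, rfl, h3.symm⟩)))))))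
        · exact Or.inr (Or.inr (Or.inr (Or.inr (Or.inr (Or.inr (Or.inr (Or.inr (Or.inl ⟨h0.symm, rfl, rfl, h3.symm⟩))))))))
        · exact Or.inr (Or.inr (Or.inr (Or.inr (Or.inr (Or.inr (Or.inr (Or.inr (Or.inr (Or.inl ⟨h0.symm, rfl, rfl, h3.symm⟩)))))))))
        · exact Or.inr (Or.inr (Or.inr (Or.inr (Or.inr (Or.inr (Or.inr (Or.inr (Or.inr (Or.inr (Or.inl ⟨h0.symm, rfl, rfl, h3.symm⟩))))))))))
        · exact Or.inr (Or.inr (Or.inr (Or.inr (Or.inr (Or.inr (Or.inr (Or.inr (Or.inr (Or.inr (Or.inr (Or.inl ⟨h0.symm, rfl, rfl, h3.symm⟩)))))))))))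
        · exact Or.inr (Or.inr (Or.inr (Or.inr (Or.inr (Or.inr (Or.inr (Or.inr (Or.inr (Or.inr (Or.inr (Or.inr (Or.inl ⟨h0.symm, rfl, rfl, h3.symm⟩))))))))))))
        · exact Or.inr (Or.inr (Or.inr (Or.inr (Or.inr (Or.inr (Or.inr (Or.inr (Or.inr (Or.inr (Or.inr (Or.inr (Or.inr (Or.inl ⟨h0.symm, rfl, rfl, h3.symm⟩)))))))))))))
        · exact Or.inr (Or.inr (Or.inr (Or.inr (Or.inr (Or.inr (Or.inr (Or.inr (Or.inr (Or.inr (Or.inr (Or.inr (Or.inr (Or.inr (Or.inl ⟨h0.symm, rfl, rfl, h3.symm⟩))))))))))))))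
      · interval_cases d2
        · exact Or.inr (Or.inr (Or.inr (Or.inr (Or.inr (Or.inr (Or.inr (Or.inr (Or.inr (Or.inr (Or.inr (Or.inr (Or.inr (Or.inr (Or.inr (Or.inl ⟨h0.symm, rfl, rfl, h3.symm⟩)))))))))))))))
        · exact Or.inr (Or.inr (Or.inr (Or.inr (Or.inr (Or.inr (Or.inr (Or.inr (Or.inr (Or.inr (Or.inr (Or.inr (Or.inr (Or.inr (Or.inr (Or.inr (Or.inl ⟨h0.symm, rfl, rfl, h3.symm⟩))))))))))))))))
        · exact Or.inr (Or.inr (Or.inr (Or.inr (Or.inr (Or.inr (Or.inr (Or.inr (Or.inr (Or.inr (Or.inr (Or.inr (Or.inr (Or.inr (Or.inr (Or.inr (Or.inr (Or.inl ⟨h0.symm, rfl, rfl, h3.symm⟩)))))))))))))))))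
        · exact Or.inr (Or.inr (Or.inr (Or.inr (Or.inr (Or.inr (Or.inr (Or.inr (Or.inr (Or.inr (Or.inr (Or.inr (Or.inr (Or.inr (Or.inr (Or.inr (Or.inr (Or.inr (Or.inl ⟨h0.symm, rfl, rfl, h3.symm⟩))))))))))))))))))
        · exact Or.inr (Or.inr (Or.inr (Or.inr (Or.inr (Or.inr (Or.inr (Or.inr (Or.inr (Or.inr (Or.inr (Or.inr (Or.inr (Or.inr (Or.inr (Or.inr (Or.inr (Or.inr (Or.inr (Or.inl ⟨h0.symm, rfl, rfl, h3.symm⟩)))))))))))))))))))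
        · exact Or.inr (Or.inr (Or.inr (Or.inr (Or.inr (Or.inr (Or.inr (Or.inr (Or.inr (Or.inr (Or.inr (Or.inr (Or.inr (Or.inr (Or.inr (Or.inr (Or.inr (Or.inr (Or.inr (Or.inr (Or.inl ⟨h0.symm, rfl, rfl, h3.symm⟩))))))))))))))))))))
        · exact Or.inr (Or.inr (Or.inr (Or.inr (Or.inr (Or.inr (Or.inr (Or.inr (Or.inr (Or.inr (Or.inr (Or.inr (Or.inr (Or.inr (Or.inr (Or.inr (Or.inr (Or.inr (Or.inr (Or.inr (Or.inr (Or.inl ⟨h0.symm, rfl, rfl, h3.symm⟩)))))))))))))))))))))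
        · exact Or.inr (Or.inr (Or.inr (Or.inr (Or.inr (Or.inr (Or.inr (Or.inr (Or.inr (Or.inr (Or.inr (Or.inr (Or.inr (Or.inr (Or.inr (Or.inr (Or.inr (Or.inr (Or.inr (Or.inr (Or.inr (Or.inr (Or.inl ⟨h0.symm, rfl, rfl, h3.symm⟩))))))))))))))))))))))
        · exact Or.inr (Or.inr (Or.inr (Or.inr (Or.inr (Or.inr (Or.inr (Or.inr (Or.inr (Or.inr (Or.inr (Or.inr (Or.inr (Or.inr (Or.inr (Or.inr (Or.inr (Or.inr (Or.inr (Or.inr (Or.inr (Or.inr (Or.inr (Or.inl ⟨h0.symm, rfl, rfl, h3.symm⟩)))))))))))))))))))))))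
        · exact Or.inr (Or.inr (Or.inr (Or.inr (Or.inr (Or.inr (Or.inr (Or.inr (Or.inr (Or.inr (Or.inr (Or.inr (Or.inr (Or.inr (Or.inr (Or.inr (Or.inr (Or.inr (Or.inr (Or.inr (Or.inr (Or.inr (Or.inr (Or.inr (Or.inl ⟨h0.symm, rfl, rfl, h3.symm⟩))))))))))))))))))))))))
      · interval_cases d2
        · exact Or.inr (Or.inr (Or.inr (Or.inr (Or.inr (Or.inr (Or.inr (Or.inr (Or.inr (Or.inr (Or.inr (Or.inr (Or.inr (Or.inr (Or.inr (Or.inr (Or.inr (Or.inr (Or.inr (Or.inr (Or.inr (Or.inr (Or.inr (Or.inr (Or.inr (Or.inl ⟨h0.symm, rfl, rfl, h3.symm⟩)))))))))))))))))))))))))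
        · exact Or.inr (Or.inr (Or.inr (Or.inr (Or.inr (Or.inr (Or.inr (Or.inr (Or.inr (Or.inr (Or.inr (Or.inr (Or.inr (Or.inr (Or.inr (Or.inr (Or.inr (Or.inr (Or.inr (Or.inr (Or.inr (Or.inr (Or.inr (Or.inr (Or.inr (Or.inr (Or.inl ⟨h0.symm, rfl, rfl, h3.symm⟩))))))))))))))))))))))))))
        · exact Or.inr (Or.inr (Or.inr (Or.inr (Or.inr (Or.inr (Or.inr (Or.inr (Or.inr (Or.inr (Or.inr (Or.inr (Or.inr (Or.inr (Or.inr (Or.inr (Or.inr (Or.inr (Or.inr (Or.inr (Or.inr (Or.inr (Or.inr (Or.inr (Or.inr (Or.inr (Or.inr (Or.inl ⟨h0.symm, rfl, rfl, h3.symm⟩)))))))))))))))))))))))))))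
        · exact Or.inr (Or.inr (Or.inr (Or.inr (Or.inr (Or.inr (Or.inr (Or.inr (Or.inr (Or.inr (Or.inr (Or.inr (Or.inr (Or.inr (Or.inr (Or.inr (Or.inr (Or.inr (Or.inr (Or.inr (Or.inr (Or.inr (Or.inr (Or.inr (Or.inr (Or.inr (Or.inr (Or.inr (Or.inl ⟨h0.symm, rfl, rfl, h3.symm⟩))))))))))))))))))))))))))))
        · exact Or.inr (Or.inr (Or.inr (Or.inr (Or.inr (Or.inr (Or.inr (Or.inr (Or.inr (Or.inr (Or.inr (Or.inr (Or.inr (Or.inr (Or.inr (Or.inr (Or.inr (Or.inr (Or.inr (Or.inr (Or.inr (Or.inr (Or.inr (Or.inr (Or.inr (Or.inr (Or.inr (Or.inr (Or.inr (⟨h0.symm, rfl, rfl, h3.symm⟩)))))))))))))))))))))))))))))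
        · exact absurd hle (by omega)
        · exact absurd hle (by omega)
        · exact absurd hle (by omega)
        · exact absurd hle (by omega)
        · exact absurd hle (by omega)

theorem pv_isIn_mono (a b t : List Char) (hab : a <:+: b)
    (h : PySem.Chars.isIn b t = true) : PySem.Chars.isIn a t = true :=
  (PySem.Chars.isIn_iff_infix a t).mpr (hab.trans ((PySem.Chars.isIn_iff_infix b t).mp h))

theorem pv_S (t : List Char) :
    pvStromalPatterns.any (fun p =>
      if PySem.Str.endswith p "_" && decide (PySem.Str.len p ≤ 4) then false
      else PySem.Chars.isIn (PySem.Chars.lower p.toList) t) =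
    pvStromalSubstrings.any (fun p => PySem.Chars.isIn p.toList t) := by
  have hendo := pv_isIn_mono "endo".toList "endothelial".toList t (by decide)
  have hicaf := pv_isIn_mono "caf".toList "icaf".toList t (by decide)
  have hmycaf := pv_isIn_mono "caf".toList "mycaf".toList t (by decide)
  have hapcaf := pv_isIn_mono "caf".toList "apcaf".toList t (by decide)
  simp only [pvStromalPatterns, pvStromalSubstrings, List.any_cons, List.any_nil]
  simp [PySem.Str.endswith, PySem.Chars.endswith, PySem.Str.len,
    PySem.Chars.lower, PySem.Chars.lowerChar, PySem.Chars.isupper, List.isSuffixOf]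
  simp only [(show Char.ofNat 102 = 'f' by decide), (show Char.ofNat 99 = 'c' by decide),
    (show Char.ofNat 97 = 'a' by decide), (show Char.ofNat 115 = 's' by decide),
    (show Char.ofNat 101 = 'e' by decide), (show Char.ofNat 112 = 'p' by decide),
    (show Char.ofNat 109 = 'm' by decide)]
  have hendo' : PySem.Chars.isIn ['e','n','d','o','t','h','e','l','i','a','l'] t = true →
      PySem.Chars.isIn ['e','n','d','o'] t = true := hendo
  have hicaf' : PySem.Chars.isIn ['i','c','a','f'] t = true →
      PySem.Chars.isIn ['c','a','f'] t = true := hicaf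
  have hmycaf' : PySem.Chars.isIn ['m','y','c','a','f'] t = true →
      PySem.Chars.isIn ['c','a','f'] t = true := hmycaf
  have hapcaf' : PySem.Chars.isIn ['a','p','c','a','f'] t = true →
      PySem.Chars.isIn ['c','a','f'] t = true := hapcaf
  rw [Bool.eq_iff_iff]
  simp only [Bool.or_eq_true]
  constructor
  · rintro (h|h|h|h|h|h|h|h|h|h|h|h|h|h|h)
    · exact Or.inl (h)
    · exact Or.inr (Or.inl (h))
    · exact Or.inr (Or.inr (Or.inl (h)))
    · exact Or.inr (Or.inr (Or.inr (Or.inl (h))))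
    · exact Or.inr (Or.inr (Or.inr (Or.inr (Or.inl (h)))))
    · exact Or.inr (Or.inr (Or.inr (Or.inr (Or.inl (hendo' h)))))
    · exact Or.inr (Or.inr (Or.inr (Or.inr (Or.inr (Or.inl (h))))))
    · exact Or.inr (Or.inr (Or.inr (Or.inr (Or.inr (Or.inr (Or.inl (h)))))))
    · exact Or.inr (Or.inr (Or.inr (Or.inr (Or.inr (Or.inr (Or.inr (Or.inl (h))))))))
    · exact Or.inr (Or.inr (Or.inr (Or.inr (Or.inr (Or.inr (Or.inr (Or.inr (Or.inl (h)))))))))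
    · exact Or.inr (Or.inr (Or.inr (Or.inr (Or.inr (Or.inr (Or.inr (Or.inr (Or.inr (Or.inl (h))))))))))
    · exact Or.inr (Or.inr (Or.inr (Or.inr (Or.inr (Or.inr (Or.inr (Or.inr (Or.inr (Or.inr (h))))))))))
    · exact Or.inr (Or.inl (hicaf' h))
    · exact Or.inr (Or.inl (hmycaf' h))
    · exact Or.inr (Or.inl (hapcaf' h))
  · rintro (h|h|h|h|h|h|h|h|h|h|h)
    · exact Or.inl (h)
    · exact Or.inr (Or.inl (h))
    · exact Or.inr (Or.inr (Or.inl (h)))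
    · exact Or.inr (Or.inr (Or.inr (Or.inl (h))))
    · exact Or.inr (Or.inr (Or.inr (Or.inr (Or.inl (h)))))
    · exact Or.inr (Or.inr (Or.inr (Or.inr (Or.inr (Or.inr (Or.inl (h)))))))
    · exact Or.inr (Or.inr (Or.inr (Or.inr (Or.inr (Or.inr (Or.inr (Or.inl (h))))))))
    · exact Or.inr (Or.inr (Or.inr (Or.inr (Or.inr (Or.inr (Or.inr (Or.inr (Or.inl (h)))))))))
    · exact Or.inr (Or.inr (Or.inr (Or.inr (Or.inr (Or.inr (Or.inr (Or.inr (Or.inr (Or.inl (h))))))))))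
    · exact Or.inr (Or.inr (Or.inr (Or.inr (Or.inr (Or.inr (Or.inr (Or.inr (Or.inr (Or.inr (Or.inl (h)))))))))))
    · exact Or.inr (Or.inr (Or.inr (Or.inr (Or.inr (Or.inr (Or.inr (Or.inr (Or.inr (Or.inr (Or.inr (Or.inl (h))))))))))))

-- ===== VERDICT (by name: the statement is the Claim_ definition above) =====
theorem is_stromal_cell_spec : Claim_equal_is_stromal_cell := by
  intro s _
  unfold Spec_is_stromal_cell is_stromal_cell is_stromal_cell_alt
  simp only [PySem.Str.startswith_eq, PySem.Str.isIn_eq, PySem.Str.toList_lower]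
  have hP := pv_P (PySem.Chars.lower s.toList)
  have hS := pv_S (PySem.Chars.lower s.toList)
  rw [← hP]
  cases h : pvStromalPrefixes.any
      (fun p => PySem.Chars.startswith (PySem.Chars.lower s.toList) p.toList) with
  | true => simp
  | false =>
    simp only [Bool.false_eq_true, if_false, Bool.false_or]
    exact hS
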